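-- pv_equiv track=rewrite | github.com/HackResist/GeeksForGeeks-POTD | 26-04-2024/Exit Point in a Matrix.py | FindExitPoint
-- ===== SOURCE A (Python) =====
-- def FindExitPoint(n, m, matrix):
--     # Define directions: right, down, left, up
--     directions = [(0, 1), (1, 0), (0, -1), (-1, 0)]
--
--     rows = len(matrix)  # Number of rows
--     columns = len(matrix[0])  # Number of columns
--
--     i, j = 0, 0
--     count = 0
--
--     while i < rows and j < columns and i >= 0 and j >= 0:
--         if matrix[i][j] != 1:
--             if count % 4 == 0:
--                 j += 1
--             elif count % 4 == 1:
--                 i += 1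
--             elif count % 4 == 2:
--                 j -= 1
--             else:
--                 i -= 1
--         else:
--             count += 1
--             matrix[i][j] = 0
--
--     if count % 4 == 0:
--         j -= 1
--     elif count % 4 == 1:
--         i -= 1
--     elif count % 4 == 2:
--         j += 1
--     else:
--         i += 1
--
--     return [i, j]
-- ===== SOURCE B (Python) =====
-- # Jump simulation: precompute per-row / per-column lists of obstacle (value 1)
-- # columns/rows in increasing order, then jump straight to the next obstacle in
-- # the current direction instead of stepping cell by cell; each hit obstacle is
-- # removed from both index lists (A clears it to 0 in the matrix instead; B does
-- # not mutate the caller's matrix, only the return value is claimed equal).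
-- def FindExitPoint(n, m, matrix):
--     rows = len(matrix)
--     cols = len(matrix[0])
--     row_ones = [[c for c in range(cols) if row[c] == 1] for row in matrix]
--     col_ones = [[r for r in range(rows) if matrix[r][c] == 1] for c in range(cols)]
--     i, j, d = 0, 0, 0
--     while True:
--         if d == 0:  # right: first obstacle in row i at column >= j
--             nxt = next((c for c in row_ones[i] if c >= j), None)
--             if nxt is None:
--                 return [i, cols - 1]
--             j = nxt
--         elif d == 1:  # down: first obstacle in column j at row >= i
--             nxt = next((r for r in col_ones[j] if r >= i), None)
--             if nxt is None:
--                 return [rows - 1, j]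
--             i = nxt
--         elif d == 2:  # left: last obstacle in row i at column <= j
--             nxt = None
--             for c in row_ones[i]:
--                 if c <= j:
--                     nxt = c
--                 else:
--                     break
--             if nxt is None:
--                 return [i, 0]
--             j = nxt
--         else:  # up: last obstacle in column j at row <= i
--             nxt = None
--             for r in col_ones[j]:
--                 if r <= i:
--                     nxt = r
--                 else:
--                     break
--             if nxt is None:
--                 return [0, j]
--             i = nxt
--         # the ball now stands on an obstacle: consume it and turn right
--         row_ones[i].remove(j)
--         col_ones[j].remove(i)
--         d = (d + 1) % 4
-- ===== Notes on version B (the rewrite author's own statement) =====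
-- stated objective: alternative
-- what changed: B precomputes per-row and per-column sorted lists of obstacle (value 1) positions and jumps the ball directly to the next obstacle in the current direction (removing each hit obstacle from both lists), instead of A's cell-by-cell stepping through the mutated matrix; B does not mutate the caller's matrix.
-- outside the precondition, e.g. on FindExitPoint(2, 2, [[0, 0], [0]]): A returns [0, 1], B raises IndexError
import Mathlib
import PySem

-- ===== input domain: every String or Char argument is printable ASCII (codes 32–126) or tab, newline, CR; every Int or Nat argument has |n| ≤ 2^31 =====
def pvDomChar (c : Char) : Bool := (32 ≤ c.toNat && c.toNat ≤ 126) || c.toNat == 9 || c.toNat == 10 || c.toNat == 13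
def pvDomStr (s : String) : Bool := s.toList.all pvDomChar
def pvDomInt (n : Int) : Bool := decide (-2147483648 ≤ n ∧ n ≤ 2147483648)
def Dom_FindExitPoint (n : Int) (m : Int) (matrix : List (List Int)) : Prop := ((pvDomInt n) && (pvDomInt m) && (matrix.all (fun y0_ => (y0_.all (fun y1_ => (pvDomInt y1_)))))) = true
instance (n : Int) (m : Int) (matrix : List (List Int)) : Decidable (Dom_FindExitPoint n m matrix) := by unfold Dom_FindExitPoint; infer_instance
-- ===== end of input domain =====

-- B replaces A's cell-by-cell walk by jumps between precomputed per-row / per-column obstacle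
-- index lists (A also clears hit cells in the caller's matrix in place; B does not mutate it —
-- only the RETURN value is claimed equal).


-- ===== PORT A =====

-- matrix[i][j]; exact where 0 ≤ i,j and the indices are in range (the loop below only reads
-- in-range cells on inputs admitted by Pre_).
def pvCell (matrix : List (List Int)) (i j : Int) : Int :=
  PySem.List.pyGetD ((PySem.List.pyGet? matrix i).getD []) j 0

-- matrix[i][j] = 0; exact for the in-range 0 ≤ i,j at which A performs it.
def pvClearAt (matrix : List (List Int)) (i j : Int) : List (List Int) :=
  matrix.set i.toNat (((PySem.List.pyGet? matrix i).getD []).set j.toNat 0)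

-- termination measure: number of cells equal to 1
def pvOnes (matrix : List (List Int)) : Nat :=
  (matrix.map (fun row => row.countP (fun v => v == 1))).sum

-- fuel: a proven-sufficient upper bound on the number of loop iterations (each iteration
-- either steps one cell or consumes a 1-cell); it only makes the recursion structural, the
-- zero-fuel case is unreachable for the fuel FindExitPoint passes (proved in the lemmas below).
def pvStepLoop (rows cols : Int) (fuel : Nat) (matrix : List (List Int)) (i j count : Int) :
    Int × Int × Int :=
  match fuel with
  | 0 => (i, j, count)
  | fuel + 1 =>
    if i < rows ∧ j < cols ∧ 0 ≤ i ∧ 0 ≤ j then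
      if pvCell matrix i j ≠ 1 then
        if PySem.Int.mod count 4 = 0 then pvStepLoop rows cols fuel matrix i (j + 1) count
        else if PySem.Int.mod count 4 = 1 then pvStepLoop rows cols fuel matrix (i + 1) j count
        else if PySem.Int.mod count 4 = 2 then pvStepLoop rows cols fuel matrix i (j - 1) count
        else pvStepLoop rows cols fuel matrix (i - 1) j count
      else
        pvStepLoop rows cols fuel (pvClearAt matrix i j) i j (count + 1)
    else (i, j, count)

-- the final adjustment after the loop
def pvFinish : Int × Int × Int → List Int
  | (i, j, count) =>
    if PySem.Int.mod count 4 = 0 then [i, j - 1]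
    else if PySem.Int.mod count 4 = 1 then [i - 1, j]
    else if PySem.Int.mod count 4 = 2 then [i, j + 1]
    else [i + 1, j]

def FindExitPoint (n : Int) (m : Int) (matrix : List (List Int)) : List Int :=
  let rows : Int := matrix.length
  let cols : Int := (matrix.headD []).length  -- len(matrix[0]); IndexError on [] is outside Pre_
  pvFinish (pvStepLoop rows cols
    ((pvOnes matrix + 1) * (matrix.length + (matrix.headD []).length + 2)) matrix 0 0 0)

-- ===== PORT B =====

-- [c for c in range(cols) if row[c] == 1]
def onesRowL (cols : Int) (row : List Int) : List Int :=
  (PySem.List.pyRange 0 cols 1).filter (fun c => PySem.List.pyGetD row c 0 == 1)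

def rowOnesF (cols : Int) (matrix : List (List Int)) : List (List Int) :=
  matrix.map (onesRowL cols)

-- [r for r in range(rows) if matrix[r][c] == 1]
def onesColL (rows : Int) (matrix : List (List Int)) (c : Int) : List Int :=
  (PySem.List.pyRange 0 rows 1).filter (fun r => pvCell matrix r c == 1)

def colOnesF (rows cols : Int) (matrix : List (List Int)) : List (List Int) :=
  (PySem.List.pyRange 0 cols 1).map (onesColL rows matrix)

-- next((c for c in lst if c >= x), None)
def pvFindGE (lst : List Int) (x : Int) : Option Int :=
  lst.find? (fun c => decide (x ≤ c))

-- the d == 2 / d == 3 scan of Source B: last element ≤ x before the first element > x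
def pvLastLE (lst : List Int) (x : Int) (acc : Option Int) : Option Int :=
  match lst with
  | [] => acc
  | c :: rest => if c ≤ x then pvLastLE rest x (some c) else acc

-- lst.remove(x); the ValueError case (x absent) is unreachable in the loop below, where the
-- removed value was just found in the list
def pvRemove (lst : List Int) (x : Int) : List Int :=
  (PySem.List.remove? lst x).getD lst

def pvSumLen (l : List (List Int)) : Nat := (l.map List.length).sum

-- fuel: a proven-sufficient bound on the number of jumps (every jump removes one obstacle
-- from the index lists); the zero-fuel case is unreachable for the fuel FindExitPoint_alt
-- passes (proved in the lemmas below).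
def pvJumpLoop (rows cols : Int) (fuel : Nat) (rowOnes colOnes : List (List Int))
    (i j d : Int) : List Int :=
  match fuel with
  | 0 => []
  | fuel + 1 =>
    if d = 0 then
      match pvFindGE (rowOnes.getD i.toNat []) j with
      | none => [i, cols - 1]
      | some c =>
        pvJumpLoop rows cols fuel
          (rowOnes.set i.toNat (pvRemove (rowOnes.getD i.toNat []) c))
          (colOnes.set c.toNat (pvRemove (colOnes.getD c.toNat []) i))
          i c (PySem.Int.mod (d + 1) 4)
    else if d = 1 then
      match pvFindGE (colOnes.getD j.toNat []) i with
      | none => [rows - 1, j]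
      | some r =>
        pvJumpLoop rows cols fuel
          (rowOnes.set r.toNat (pvRemove (rowOnes.getD r.toNat []) j))
          (colOnes.set j.toNat (pvRemove (colOnes.getD j.toNat []) r))
          r j (PySem.Int.mod (d + 1) 4)
    else if d = 2 then
      match pvLastLE (rowOnes.getD i.toNat []) j none with
      | none => [i, 0]
      | some c =>
        pvJumpLoop rows cols fuel
          (rowOnes.set i.toNat (pvRemove (rowOnes.getD i.toNat []) c))
          (colOnes.set c.toNat (pvRemove (colOnes.getD c.toNat []) i))
          i c (PySem.Int.mod (d + 1) 4)
    else
      match pvLastLE (colOnes.getD j.toNat []) i none with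
      | none => [0, j]
      | some r =>
        pvJumpLoop rows cols fuel
          (rowOnes.set r.toNat (pvRemove (rowOnes.getD r.toNat []) j))
          (colOnes.set j.toNat (pvRemove (colOnes.getD j.toNat []) r))
          r j (PySem.Int.mod (d + 1) 4)

def FindExitPoint_alt (n : Int) (m : Int) (matrix : List (List Int)) : List Int :=
  let rows : Int := matrix.length
  let cols : Int := (matrix.headD []).length  -- len(matrix[0]); IndexError on [] is outside Pre_
  pvJumpLoop rows cols
    (pvSumLen (rowOnesF cols matrix) + pvSumLen (colOnesF rows cols matrix) + 1)
    (rowOnesF cols matrix) (colOnesF rows cols matrix) 0 0 0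

-- ===== PRECONDITION & SPEC =====

-- Pre_ excludes the empty matrix (A raises IndexError on matrix[0]) and matrices with a row
-- shorter than row 0: there A raises IndexError as soon as the walk enters the missing part
-- of such a row, and whether it returns at all is an accident of the walk path (B reads every
-- row up to len(matrix[0]) up front).
def Pre_FindExitPoint (n : Int) (m : Int) (matrix : List (List Int)) : Prop :=
  matrix ≠ [] ∧ ∀ row ∈ matrix, (matrix.headD []).length ≤ row.length
instance (n : Int) (m : Int) (matrix : List (List Int)) : Decidable (Pre_FindExitPoint n m matrix) := by
  unfold Pre_FindExitPoint; infer_instance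

def pvWitness_FindExitPoint : Int × Int × List (List Int) := (3, 3, [[0, 1, 0], [0, 0, 1], [1, 0, 0]])

def Spec_FindExitPoint (n : Int) (m : Int) (matrix : List (List Int)) (out : List Int) : Prop := out = FindExitPoint_alt n m matrix
instance (n : Int) (m : Int) (matrix : List (List Int)) (out : List Int) : Decidable (Spec_FindExitPoint n m matrix out) := by unfold Spec_FindExitPoint; infer_instance

-- ===== CLAIM (what is proved, stated in full; the proofs are below) =====
def Claim_equal_FindExitPoint : Prop := ∀ (n : Int) (m : Int) (matrix : List (List Int)), Dom_FindExitPoint n m matrix → Pre_FindExitPoint n m matrix → Spec_FindExitPoint n m matrix (FindExitPoint n m matrix)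

-- ===== LEMMAS AND PROOFS =====

lemma countP_set_zero_lt (row : List Int) (k : Nat) (hk : k < row.length) (h1 : row[k] = 1) :
    (row.set k 0).countP (fun v => v == 1) < row.countP (fun v => v == 1) := by
  induction row generalizing k with
  | nil => simp at hk
  | cons x xs ih =>
    cases k with
    | zero =>
      have hx : x = 1 := by simpa using h1
      subst hx
      simp only [List.set_cons_zero, List.countP_cons]
      norm_num
    | succ k =>
      simp only [List.set_cons_succ, List.countP_cons]
      have := ih k (by simpa using hk) (by simpa using h1)
      omega

lemma sum_map_countP_set_lt (M : List (List Int)) (k : Nat) (r : List Int)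
    (hk : k < M.length)
    (h : r.countP (fun v => v == 1) < (M[k]).countP (fun v => v == 1)) :
    pvOnes (M.set k r) < pvOnes M := by
  induction M generalizing k with
  | nil => simp at hk
  | cons x xs ih =>
    cases k with
    | zero =>
      simp only [List.getElem_cons_zero] at h
      simp only [List.set_cons_zero, pvOnes, List.map_cons, List.sum_cons]
      omega
    | succ k =>
      have := ih k (by simpa using hk) (by simpa using h)
      simp only [List.set_cons_succ, pvOnes, List.map_cons, List.sum_cons] at *
      omega

lemma pvOnes_clear_lt (M : List (List Int)) (i j : Int) (hi : 0 ≤ i) (hj : 0 ≤ j)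
    (h1 : pvCell M i j = 1) : pvOnes (pvClearAt M i j) < pvOnes M := by
  by_cases hil : i.toNat < M.length
  · have hrow : (PySem.List.pyGet? M i).getD [] = M[i.toNat] := by
      rw [PySem.List.pyGet?_of_nonneg _ hi]
      simp [List.getElem?_eq_getElem hil]
    by_cases hjl : j.toNat < (M[i.toNat]).length
    · have hcv : (M[i.toNat])[j.toNat] = 1 := by
        have := h1
        rw [pvCell, hrow, PySem.List.pyGetD_eq_getElem _ _ hj (by omega)] at this
        exact this
      rw [pvClearAt, hrow]
      exact sum_map_countP_set_lt M i.toNat _ hil (countP_set_zero_lt _ _ hjl hcv)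
    · exfalso
      rw [pvCell, hrow] at h1
      rw [PySem.List.pyGetD_of_none] at h1
      · norm_num at h1
      · rw [PySem.List.pyGet?_of_nonneg _ hj, List.getElem?_eq_none_iff]
        omega
  · exfalso
    have hrow : (PySem.List.pyGet? M i).getD [] = ([] : List Int) := by
      rw [PySem.List.pyGet?_of_nonneg _ hi, List.getElem?_eq_none_iff.mpr (by omega)]
      rfl
    rw [pvCell, hrow] at h1
    rw [PySem.List.pyGetD_of_none _ _ _ (by rw [PySem.List.pyGet?_of_nonneg _ hj]; rfl)] at h1
    norm_num at h1

lemma pvRemove_length_lt (lst : List Int) (x : Int) (hx : x ∈ lst) :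
    (pvRemove lst x).length < lst.length := by
  rw [pvRemove, PySem.List.remove?]
  cases h : List.idxOf? x lst with
  | none => simp [List.idxOf?_eq_none_iff] at h; exact absurd hx h
  | some k =>
    have hk : k < lst.length := by
      rcases List.idxOf?_eq_some_iff.mp h with ⟨hlt, _⟩; exact hlt
    simp only [Option.map_some, Option.getD_some, List.length_eraseIdx, if_pos hk]
    omega

lemma pvRemove_length_le (lst : List Int) (x : Int) : (pvRemove lst x).length ≤ lst.length := by
  rw [pvRemove, PySem.List.remove?]
  cases h : List.idxOf? x lst with
  | none => simp
  | some k =>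
    simp only [Option.map_some, Option.getD_some, List.length_eraseIdx]
    split <;> omega

lemma pvSumLen_set_le (l : List (List Int)) (k : Nat) (r : List Int)
    (h : r.length ≤ (l.getD k []).length) : pvSumLen (l.set k r) ≤ pvSumLen l := by
  induction l generalizing k with
  | nil => simp [pvSumLen]
  | cons x xs ih =>
    cases k with
    | zero =>
      simp only [List.getD_cons_zero] at h
      simp only [List.set_cons_zero, pvSumLen, List.map_cons, List.sum_cons]
      omega
    | succ k =>
      have := ih k (by simpa using h)
      simp only [List.set_cons_succ, pvSumLen, List.map_cons, List.sum_cons] at *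
      omega

lemma pvSumLen_set_lt (l : List (List Int)) (k : Nat) (r : List Int)
    (hk : k < l.length) (h : r.length < (l.getD k []).length) :
    pvSumLen (l.set k r) < pvSumLen l := by
  induction l generalizing k with
  | nil => simp at hk
  | cons x xs ih =>
    cases k with
    | zero =>
      simp only [List.getD_cons_zero] at h
      simp only [List.set_cons_zero, pvSumLen, List.map_cons, List.sum_cons]
      omega
    | succ k =>
      have := ih k (by simpa using hk) (by simpa using h)
      simp only [List.set_cons_succ, pvSumLen, List.map_cons, List.sum_cons] at *
      omega

lemma pvLastLE_mem : ∀ (lst : List Int) (x acc c : _),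
    pvLastLE lst x acc = some c → c ∈ lst ∨ acc = some c
  | [], _, _, _, h => Or.inr h
  | a :: rest, x, acc, c, h => by
    rw [pvLastLE] at h
    by_cases hax : a ≤ x
    · rw [if_pos hax] at h
      rcases pvLastLE_mem rest x (some a) c h with h' | h'
      · exact Or.inl (List.mem_cons_of_mem _ h')
      · exact Or.inl (by simp only [Option.some.injEq] at h'; simp [h'])
    · rw [if_neg hax] at h
      exact Or.inr h

lemma rowAt_eq (M : List (List Int)) (i : Int) (hi : 0 ≤ i) :
    (PySem.List.pyGet? M i).getD [] = M.getD i.toNat [] := by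
  rw [PySem.List.pyGet?_of_nonneg _ hi, List.getD_eq_getElem?_getD]

lemma rowOnesF_getD (cols : Int) (M : List (List Int)) (k : Nat) (hk : k < M.length) :
    (rowOnesF cols M).getD k [] = onesRowL cols (M.getD k []) := by
  simp [rowOnesF, List.getD_eq_getElem?_getD, List.getElem?_map, List.getElem?_eq_getElem hk]

lemma colOnesF_getD (rows cols : Int) (M : List (List Int)) (c : Int)
    (hc0 : 0 ≤ c) (hc : c < cols) :
    (colOnesF rows cols M).getD c.toNat [] = onesColL rows M c := by
  have hcc : ((c.toNat : Int)) = c := Int.toNat_of_nonneg hc0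
  rw [colOnesF, ← PySem.List.pyGetD_natCast, hcc,
    PySem.List.pyGetD_map_pyRange_of_nonneg _ _ _ _ hc0 hc]

lemma mem_onesRowL {cols : Int} {row : List Int} {x : Int} :
    x ∈ onesRowL cols row ↔ (0 ≤ x ∧ x < cols) ∧ PySem.List.pyGetD row x 0 = 1 := by
  simp [onesRowL, List.mem_filter, PySem.List.mem_pyRange_one]

lemma mem_onesColL {rows : Int} {M : List (List Int)} {c x : Int} :
    x ∈ onesColL rows M c ↔ (0 ≤ x ∧ x < rows) ∧ pvCell M x c = 1 := by
  simp [onesColL, List.mem_filter, PySem.List.mem_pyRange_one]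

lemma pairwise_onesRowL (cols : Int) (row : List Int) :
    (onesRowL cols row).Pairwise (· < ·) :=
  (PySem.List.pairwise_lt_pyRange_one 0 cols).filter _

lemma nodup_onesRowL (cols : Int) (row : List Int) : (onesRowL cols row).Nodup :=
  (pairwise_onesRowL cols row).imp ne_of_lt

lemma pairwise_onesColL (rows : Int) (M : List (List Int)) (c : Int) :
    (onesColL rows M c).Pairwise (· < ·) :=
  (PySem.List.pairwise_lt_pyRange_one 0 rows).filter _

lemma nodup_onesColL (rows : Int) (M : List (List Int)) (c : Int) :
    (onesColL rows M c).Nodup :=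
  (pairwise_onesColL rows M c).imp ne_of_lt

-- characterisation of Source B's two scans -------------------------------------

lemma pvFindGE_none (l : List Int) (x : Int) (h : ∀ c ∈ l, c < x) :
    pvFindGE l x = none := by
  apply List.find?_eq_none.mpr
  intro c hc
  simpa using by have := h c hc; omega

lemma pvFindGE_self (l : List Int) (x : Int) (hp : l.Pairwise (· < ·)) (hx : x ∈ l) :
    pvFindGE l x = some x := by
  induction l with
  | nil => cases hx
  | cons a rest ih =>
    obtain ⟨ha, hp'⟩ := List.pairwise_cons.mp hp
    rcases List.mem_cons.mp hx with rfl | hxr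
    · exact List.find?_cons_of_pos (by simp)
    · rw [pvFindGE, List.find?_cons_of_neg (by simp; exact ha x hxr)]
      exact ih hp' hxr

lemma pvFindGE_shift (l : List Int) (x : Int) (h : ∀ c ∈ l, c ≠ x) :
    pvFindGE l x = pvFindGE l (x + 1) := by
  induction l with
  | nil => rfl
  | cons a rest ih =>
    have hax : a ≠ x := h a (by simp)
    by_cases hle : x ≤ a
    · have : x + 1 ≤ a := by omega
      rw [pvFindGE, pvFindGE, List.find?_cons_of_pos (by simpa using hle),
        List.find?_cons_of_pos (by simpa using this)]
    · have : ¬ (x + 1 ≤ a) := by omega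
      rw [pvFindGE, pvFindGE, List.find?_cons_of_neg (by simpa using hle),
        List.find?_cons_of_neg (by simpa using this)]
      exact ih (fun c hc => h c (List.mem_cons_of_mem _ hc))

lemma pvLastLE_all_gt (l : List Int) (x : Int) (acc : Option Int)
    (h : ∀ c ∈ l, x < c) : pvLastLE l x acc = acc := by
  cases l with
  | nil => rfl
  | cons a rest =>
    rw [pvLastLE, if_neg (by have := h a (by simp); omega)]

lemma pvLastLE_self (l : List Int) (x : Int) (hp : l.Pairwise (· < ·)) (hx : x ∈ l) :
    ∀ acc, pvLastLE l x acc = some x := by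
  induction l with
  | nil => cases hx
  | cons a rest ih =>
    intro acc
    obtain ⟨ha, hp'⟩ := List.pairwise_cons.mp hp
    rcases List.mem_cons.mp hx with rfl | hxr
    · rw [pvLastLE, if_pos le_rfl]
      exact pvLastLE_all_gt rest _ _ ha
    · rw [pvLastLE, if_pos (le_of_lt (ha x hxr))]
      exact ih hp' hxr _

lemma pvLastLE_shift (l : List Int) (x : Int) (h : ∀ c ∈ l, c ≠ x) :
    ∀ acc, pvLastLE l x acc = pvLastLE l (x - 1) acc := by
  induction l with
  | nil => intro acc; rfl
  | cons a rest ih =>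
    intro acc
    have hax : a ≠ x := h a (by simp)
    by_cases hle : a ≤ x
    · rw [pvLastLE, if_pos hle, pvLastLE, if_pos (by omega)]
      exact ih (fun c hc => h c (List.mem_cons_of_mem _ hc)) _
    · rw [pvLastLE, if_neg hle, pvLastLE, if_neg (by omega)]

-- list.remove on distinct lists --------------------------------------------

lemma pvRemove_eq_filter (l : List Int) (x : Int) (hnd : l.Nodup) (hx : x ∈ l) :
    pvRemove l x = l.filter (fun c => c != x) := by
  induction l with
  | nil => cases hx
  | cons a rest ih =>
    obtain ⟨hna, hnr⟩ := List.nodup_cons.mp hnd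
    by_cases hax : a = x
    · subst hax
      rw [pvRemove, PySem.List.remove?, List.idxOf?_cons, if_pos (by simp)]
      simp only [Option.map_some, Option.getD_some, List.eraseIdx_cons_zero]
      rw [List.filter_cons, if_neg (by simp)]
      exact (List.filter_eq_self.mpr (fun c hc => by
        simp only [bne_iff_ne, ne_eq]
        exact fun hce => hna (hce ▸ hc))).symm
    · have hxr : x ∈ rest := by
        rcases List.mem_cons.mp hx with rfl | h
        · exact absurd rfl hax
        · exact h
      cases hk : List.idxOf? x rest with
      | none => rw [List.idxOf?_eq_none_iff] at hk; exact absurd hxr hk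
      | some k =>
        have ihv := ih hnr hxr
        rw [pvRemove, PySem.List.remove?, hk] at ihv
        simp only [Option.map_some, Option.getD_some] at ihv
        rw [pvRemove, PySem.List.remove?, List.idxOf?_cons, if_neg (by simp [hax]), hk]
        simp only [Option.map_some, Option.getD_some, List.eraseIdx_cons_succ]
        rw [List.filter_cons, if_pos (by simp [hax]), ← ihv]

-- clearing a 1-cell updates the obstacle indices by removal -----------------

lemma onesRowL_set_zero (cols : Int) (row : List Int) (c : Int)
    (hc0 : 0 ≤ c) (hc : c < cols) (hlen : cols.toNat ≤ row.length)
    (h1 : PySem.List.pyGetD row c 0 = 1) :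
    onesRowL cols (row.set c.toNat 0) = pvRemove (onesRowL cols row) c := by
  rw [pvRemove_eq_filter _ _ (nodup_onesRowL cols row) (mem_onesRowL.mpr ⟨⟨hc0, hc⟩, h1⟩)]
  unfold onesRowL
  rw [List.filter_filter]
  apply List.filter_congr
  intro x hx
  obtain ⟨hx0, hxc⟩ := PySem.List.mem_pyRange_one.mp hx
  have hxlen : x.toNat < (row.set c.toNat 0).length := by
    rw [List.length_set]; omega
  by_cases hxeq : x = c
  · subst hxeq
    rw [PySem.List.pyGetD_eq_getElem _ _ hx0 (by exact_mod_cast (by omega : x < ((row.set x.toNat 0).length : Int))),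
      List.getElem_set, if_pos rfl]
    simp
  · rw [PySem.List.pyGetD_eq_getElem _ _ hx0 (by exact_mod_cast (by omega : x < ((row.set c.toNat 0).length : Int))),
      List.getElem_set, if_neg (by omega),
      PySem.List.pyGetD_eq_getElem row _ hx0 (by exact_mod_cast (by omega : x < (row.length : Int)))]
    have hb : (x != c) = true := by simp [hxeq]
    rw [hb, Bool.true_and]

lemma pvCell_clear (M : List (List Int)) (i c r x : Int)
    (hi0 : 0 ≤ i) (hil : i.toNat < M.length) (hc0 : 0 ≤ c)
    (hcl : c.toNat < (M.getD i.toNat []).length)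
    (hr0 : 0 ≤ r) (hx0 : 0 ≤ x) :
    pvCell (pvClearAt M i c) r x = if r = i ∧ x = c then 0 else pvCell M r x := by
  rw [pvCell, pvCell, rowAt_eq _ _ hr0, rowAt_eq _ _ hr0, pvClearAt, rowAt_eq _ _ hi0]
  by_cases hri : r = i
  · subst hri
    have hset : (M.set r.toNat ((M.getD r.toNat []).set c.toNat 0)).getD r.toNat [] =
        (M.getD r.toNat []).set c.toNat 0 := by
      rw [List.getD_eq_getElem?_getD,
        List.getElem?_eq_getElem (by rw [List.length_set]; exact hil)]
      simp
    rw [hset]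
    by_cases hxc : x = c
    · subst hxc
      rw [if_pos ⟨rfl, rfl⟩,
        PySem.List.pyGetD_eq_getElem _ _ hx0 (by rw [List.length_set]; exact_mod_cast (by omega : x < ((M.getD r.toNat []).length : Int))),
        List.getElem_set, if_pos rfl]
    · rw [if_neg (by tauto)]
      by_cases hxl : x.toNat < (M.getD r.toNat []).length
      · rw [PySem.List.pyGetD_eq_getElem _ _ hx0 (by rw [List.length_set]; exact_mod_cast (by omega : x < ((M.getD r.toNat []).length : Int))),
          List.getElem_set, if_neg (by omega),
          ← PySem.List.pyGetD_eq_getElem _ _ hx0 (by exact_mod_cast (by omega : x < ((M.getD r.toNat []).length : Int)))]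
      · rw [PySem.List.pyGetD_of_none _ _ _ (by
            rw [PySem.List.pyGet?_of_nonneg _ hx0, List.getElem?_eq_none_iff, List.length_set]; omega),
          PySem.List.pyGetD_of_none _ _ _ (by
            rw [PySem.List.pyGet?_of_nonneg _ hx0, List.getElem?_eq_none_iff]; omega)]
  · rw [if_neg (by tauto)]
    have : (M.set i.toNat ((M.getD i.toNat []).set c.toNat 0)).getD r.toNat [] =
        M.getD r.toNat [] := by
      rw [List.getD_eq_getElem?_getD, List.getElem?_set_ne (by omega),
        ← List.getD_eq_getElem?_getD]
    rw [this]

lemma rowOnesF_clear (cols : Int) (M : List (List Int)) (i c : Int)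
    (hi0 : 0 ≤ i) (hc0 : 0 ≤ c) (hc : c < cols)
    (hlen : cols.toNat ≤ (M.getD i.toNat []).length)
    (h1 : PySem.List.pyGetD (M.getD i.toNat []) c 0 = 1) :
    rowOnesF cols (pvClearAt M i c) =
      (rowOnesF cols M).set i.toNat (pvRemove (onesRowL cols (M.getD i.toNat [])) c) := by
  rw [pvClearAt, rowAt_eq _ _ hi0, rowOnesF, List.map_set,
    onesRowL_set_zero cols _ c hc0 hc hlen h1]
  rfl

lemma colOnesF_clear (rows cols : Int) (M : List (List Int)) (i c : Int)
    (hrows : rows = (M.length : Int))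
    (hi0 : 0 ≤ i) (hi : i < rows) (hc0 : 0 ≤ c) (hc : c < cols)
    (hcl : c.toNat < (M.getD i.toNat []).length)
    (h1 : pvCell M i c = 1) :
    colOnesF rows cols (pvClearAt M i c) =
      (colOnesF rows cols M).set c.toNat (pvRemove (onesColL rows M c) i) := by
  have hil : i.toNat < M.length := by omega
  apply List.ext_getElem
  · simp [colOnesF, PySem.List.length_pyRange_one, List.length_set]
  · intro k h₁ h₂
    have hk : k < (cols - 0).toNat := by
      simpa [colOnesF, PySem.List.length_pyRange_one] using h₁
    simp only [colOnesF, List.getElem_map, PySem.List.getElem_pyRange_one]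
    rw [List.getElem_set]
    by_cases hkc : c.toNat = k
    · rw [if_pos hkc]
      have hck : ((0:Int) + (k : Int)) = c := by omega
      rw [hck, pvRemove_eq_filter _ _ (nodup_onesColL rows M c)
        (mem_onesColL.mpr ⟨⟨hi0, hi⟩, h1⟩)]
      unfold onesColL
      rw [List.filter_filter]
      apply List.filter_congr
      intro r hr
      obtain ⟨hr0, hrr⟩ := PySem.List.mem_pyRange_one.mp hr
      rw [pvCell_clear M i c r c hi0 hil hc0 hcl hr0 hc0]
      by_cases hri : r = i
      · subst hri; rw [if_pos ⟨rfl, rfl⟩]; simp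
      · rw [if_neg (by tauto)]
        have hb : (r != i) = true := by simp [hri]
        rw [hb, Bool.true_and]
    · rw [if_neg hkc]
      simp only [List.getElem_map, PySem.List.getElem_pyRange_one]
      unfold onesColL
      apply List.filter_congr
      intro r hr
      obtain ⟨hr0, hrr⟩ := PySem.List.mem_pyRange_one.mp hr
      have hxk : ((0:Int) + (k : Int)) ≠ c := by omega
      rw [pvCell_clear M i c r (0 + (k : Int)) hi0 hil hc0 hcl hr0 (by omega)]
      rw [if_neg (by tauto)]

-- A's straight runs reach exactly what B's scans find ------------------------

lemma pvLastLE_le : ∀ (lst : List Int) (x : Int) (acc : Option Int) (c : Int),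
    pvLastLE lst x acc = some c → (∀ v, acc = some v → v ≤ x) → c ≤ x
  | [], x, acc, c, h, hacc => hacc c h
  | a :: rest, x, acc, c, h, hacc => by
    rw [pvLastLE] at h
    by_cases hax : a ≤ x
    · rw [if_pos hax] at h
      exact pvLastLE_le rest x (some a) c h
        (fun v hv => by rw [← Option.some.inj hv]; exact hax)
    · rw [if_neg hax] at h
      exact hacc c h

lemma run_right_none (rows cols : Int) (M : List (List Int)) (i count : Int)
    (hi0 : 0 ≤ i) (hi : i < rows) (hmod : PySem.Int.mod count 4 = 0) :
    ∀ n (j : Int) (f : Nat), 0 ≤ j → j ≤ cols → (cols - j).toNat = n → n ≤ f →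
      pvFindGE (onesRowL cols (M.getD i.toNat [])) j = none →
      pvStepLoop rows cols (f + 1) M i j count = (i, j + (cols - j), count) := by
  intro n
  induction n using Nat.strong_induction_on with
  | _ n ih =>
  intro j f hj0 hjc hn hf heq
  rcases eq_or_lt_of_le hjc with rfl | hjlt
  · rw [pvStepLoop, if_neg (by omega)]
    simp
  · have hcell : pvCell M i j = PySem.List.pyGetD (M.getD i.toNat []) j 0 := by
      rw [pvCell, rowAt_eq _ _ hi0]
    have hv : PySem.List.pyGetD (M.getD i.toNat []) j 0 ≠ 1 := by
      intro h1
      have hmem : j ∈ onesRowL cols (M.getD i.toNat []) :=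
        mem_onesRowL.mpr ⟨⟨hj0, hjlt⟩, h1⟩
      rw [pvFindGE_self _ _ (pairwise_onesRowL _ _) hmem] at heq
      simp at heq
    obtain ⟨f', rfl⟩ : ∃ f', f = f' + 1 := ⟨f - 1, by omega⟩
    rw [pvStepLoop, if_pos ⟨hi, hjlt, hi0, hj0⟩, if_pos (by rw [hcell]; exact hv),
      if_pos hmod]
    have hshift : pvFindGE (onesRowL cols (M.getD i.toNat [])) (j + 1) = none := by
      rw [← pvFindGE_shift _ _ (fun c hc hcj => hv (by rw [← hcj]; exact (mem_onesRowL.mp hc).2))]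
      exact heq
    have := ih ((cols - (j + 1)).toNat) (by omega) (j + 1) f' (by omega) (by omega) rfl
      (by omega) hshift
    rw [this]
    have : j + 1 + (cols - (j + 1)) = j + (cols - j) := by ring
    rw [this]

lemma run_right_some (rows cols : Int) (M : List (List Int)) (i count c : Int)
    (hi0 : 0 ≤ i) (hi : i < rows) (hmod : PySem.Int.mod count 4 = 0) :
    ∀ n (j : Int) (f : Nat), 0 ≤ j → j ≤ cols → (cols - j).toNat = n → n ≤ f →
      pvFindGE (onesRowL cols (M.getD i.toNat [])) j = some c →
      pvStepLoop rows cols (f + 1) M i j count =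
        pvStepLoop rows cols (f - (c - j).toNat) (pvClearAt M i c) i c (count + 1) := by
  intro n
  induction n using Nat.strong_induction_on with
  | _ n ih =>
  intro j f hj0 hjc hn hf heq
  have hcj : j ≤ c := by simpa using List.find?_some heq
  rcases eq_or_lt_of_le hjc with rfl | hjlt
  · exfalso
    rw [pvFindGE_none _ _ (fun x hx => (mem_onesRowL.mp hx).1.2)] at heq
    simp at heq
  · have hcell : pvCell M i j = PySem.List.pyGetD (M.getD i.toNat []) j 0 := by
      rw [pvCell, rowAt_eq _ _ hi0]
    by_cases hv : PySem.List.pyGetD (M.getD i.toNat []) j 0 = 1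
    · have hmem : j ∈ onesRowL cols (M.getD i.toNat []) :=
        mem_onesRowL.mpr ⟨⟨hj0, hjlt⟩, hv⟩
      rw [pvFindGE_self _ _ (pairwise_onesRowL _ _) hmem] at heq
      obtain rfl : j = c := Option.some.inj heq
      rw [pvStepLoop, if_pos ⟨hi, hjlt, hi0, hj0⟩,
        if_neg (by rw [hcell]; simpa using hv)]
      simp
    · have hne : c ≠ j := fun he => hv (he ▸ (mem_onesRowL.mp (List.mem_of_find?_eq_some heq)).2)
      have hcc : c < cols := (mem_onesRowL.mp (List.mem_of_find?_eq_some heq)).1.2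
      obtain ⟨f', rfl⟩ : ∃ f', f = f' + 1 := ⟨f - 1, by omega⟩
      rw [pvStepLoop, if_pos ⟨hi, hjlt, hi0, hj0⟩, if_pos (by rw [hcell]; exact hv),
        if_pos hmod]
      have hshift : pvFindGE (onesRowL cols (M.getD i.toNat [])) (j + 1) = some c := by
        rw [← pvFindGE_shift _ _ (fun x hx hxj => hv (by rw [← hxj]; exact (mem_onesRowL.mp hx).2))]
        exact heq
      have := ih ((cols - (j + 1)).toNat) (by omega) (j + 1) f' (by omega) (by omega) rfl
        (by omega) hshift
      rw [this]
      have : f' + 1 - (c - j).toNat = f' - (c - (j + 1)).toNat := by omega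
      rw [this]

lemma run_down_none (rows cols : Int) (M : List (List Int)) (j count : Int)
    (hj0 : 0 ≤ j) (hj : j < cols) (hmod : PySem.Int.mod count 4 = 1) :
    ∀ n (i : Int) (f : Nat), 0 ≤ i → i ≤ rows → (rows - i).toNat = n → n ≤ f →
      pvFindGE (onesColL rows M j) i = none →
      pvStepLoop rows cols (f + 1) M i j count = (i + (rows - i), j, count) := by
  intro n
  induction n using Nat.strong_induction_on with
  | _ n ih =>
  intro i f hi0 hir hn hf heq
  rcases eq_or_lt_of_le hir with rfl | hilt
  · rw [pvStepLoop, if_neg (by omega)]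
    simp
  · have hv : pvCell M i j ≠ 1 := by
      intro h1
      have hmem : i ∈ onesColL rows M j := mem_onesColL.mpr ⟨⟨hi0, hilt⟩, h1⟩
      rw [pvFindGE_self _ _ (pairwise_onesColL _ _ _) hmem] at heq
      simp at heq
    obtain ⟨f', rfl⟩ : ∃ f', f = f' + 1 := ⟨f - 1, by omega⟩
    rw [pvStepLoop, if_pos ⟨hilt, hj, hi0, hj0⟩, if_pos hv,
      if_neg (by omega), if_pos hmod]
    have hshift : pvFindGE (onesColL rows M j) (i + 1) = none := by
      rw [← pvFindGE_shift _ _ (fun r hr hri => hv (by rw [← hri]; exact (mem_onesColL.mp hr).2))]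
      exact heq
    have := ih ((rows - (i + 1)).toNat) (by omega) (i + 1) f' (by omega) (by omega) rfl
      (by omega) hshift
    rw [this]
    have : i + 1 + (rows - (i + 1)) = i + (rows - i) := by ring
    rw [this]

lemma run_down_some (rows cols : Int) (M : List (List Int)) (j count r : Int)
    (hj0 : 0 ≤ j) (hj : j < cols) (hmod : PySem.Int.mod count 4 = 1) :
    ∀ n (i : Int) (f : Nat), 0 ≤ i → i ≤ rows → (rows - i).toNat = n → n ≤ f →
      pvFindGE (onesColL rows M j) i = some r →
      pvStepLoop rows cols (f + 1) M i j count =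
        pvStepLoop rows cols (f - (r - i).toNat) (pvClearAt M r j) r j (count + 1) := by
  intro n
  induction n using Nat.strong_induction_on with
  | _ n ih =>
  intro i f hi0 hir hn hf heq
  have hri : i ≤ r := by simpa using List.find?_some heq
  rcases eq_or_lt_of_le hir with rfl | hilt
  · exfalso
    rw [pvFindGE_none _ _ (fun x hx => (mem_onesColL.mp hx).1.2)] at heq
    simp at heq
  · by_cases hv : pvCell M i j = 1
    · have hmem : i ∈ onesColL rows M j := mem_onesColL.mpr ⟨⟨hi0, hilt⟩, hv⟩
      rw [pvFindGE_self _ _ (pairwise_onesColL _ _ _) hmem] at heq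
      obtain rfl : i = r := Option.some.inj heq
      rw [pvStepLoop, if_pos ⟨hilt, hj, hi0, hj0⟩, if_neg (by simpa using hv)]
      simp
    · have hne : r ≠ i := fun he => hv (he ▸ (mem_onesColL.mp (List.mem_of_find?_eq_some heq)).2)
      have hrr : r < rows := (mem_onesColL.mp (List.mem_of_find?_eq_some heq)).1.2
      obtain ⟨f', rfl⟩ : ∃ f', f = f' + 1 := ⟨f - 1, by omega⟩
      rw [pvStepLoop, if_pos ⟨hilt, hj, hi0, hj0⟩, if_pos hv,
        if_neg (by omega), if_pos hmod]
      have hshift : pvFindGE (onesColL rows M j) (i + 1) = some r := by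
        rw [← pvFindGE_shift _ _ (fun x hx hxi => hv (by rw [← hxi]; exact (mem_onesColL.mp hx).2))]
        exact heq
      have := ih ((rows - (i + 1)).toNat) (by omega) (i + 1) f' (by omega) (by omega) rfl
        (by omega) hshift
      rw [this]
      have : f' + 1 - (r - i).toNat = f' - (r - (i + 1)).toNat := by omega
      rw [this]

lemma run_left_none (rows cols : Int) (M : List (List Int)) (i count : Int)
    (hi0 : 0 ≤ i) (hi : i < rows) (hmod : PySem.Int.mod count 4 = 2) :
    ∀ n (j : Int) (f : Nat), -1 ≤ j → j < cols → (j + 1).toNat = n → n ≤ f →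
      pvLastLE (onesRowL cols (M.getD i.toNat [])) j none = none →
      pvStepLoop rows cols (f + 1) M i j count = (i, j - (j + 1), count) := by
  intro n
  induction n using Nat.strong_induction_on with
  | _ n ih =>
  intro j f hj0 hjc hn hf heq
  rcases eq_or_lt_of_le hj0 with rfl | hjgt
  · rw [pvStepLoop, if_neg (by omega)]
    norm_num
  · have hj0' : 0 ≤ j := by omega
    have hcell : pvCell M i j = PySem.List.pyGetD (M.getD i.toNat []) j 0 := by
      rw [pvCell, rowAt_eq _ _ hi0]
    have hv : PySem.List.pyGetD (M.getD i.toNat []) j 0 ≠ 1 := by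
      intro h1
      have hmem : j ∈ onesRowL cols (M.getD i.toNat []) :=
        mem_onesRowL.mpr ⟨⟨hj0', hjc⟩, h1⟩
      rw [pvLastLE_self _ _ (pairwise_onesRowL _ _) hmem] at heq
      simp at heq
    obtain ⟨f', rfl⟩ : ∃ f', f = f' + 1 := ⟨f - 1, by omega⟩
    rw [pvStepLoop, if_pos ⟨hi, hjc, hi0, hj0'⟩, if_pos (by rw [hcell]; exact hv),
      if_neg (by omega), if_neg (by omega), if_pos hmod]
    have hshift : pvLastLE (onesRowL cols (M.getD i.toNat [])) (j - 1) none = none := by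
      rw [← pvLastLE_shift _ _ (fun c hc hcj => hv (by rw [← hcj]; exact (mem_onesRowL.mp hc).2))]
      exact heq
    have := ih ((j - 1 + 1).toNat) (by omega) (j - 1) f' (by omega) (by omega) rfl
      (by omega) hshift
    rw [this]
    have : j - 1 - (j - 1 + 1) = j - (j + 1) := by ring
    rw [this]

lemma run_left_some (rows cols : Int) (M : List (List Int)) (i count c : Int)
    (hi0 : 0 ≤ i) (hi : i < rows) (hmod : PySem.Int.mod count 4 = 2) :
    ∀ n (j : Int) (f : Nat), -1 ≤ j → j < cols → (j + 1).toNat = n → n ≤ f →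
      pvLastLE (onesRowL cols (M.getD i.toNat [])) j none = some c →
      pvStepLoop rows cols (f + 1) M i j count =
        pvStepLoop rows cols (f - (j - c).toNat) (pvClearAt M i c) i c (count + 1) := by
  intro n
  induction n using Nat.strong_induction_on with
  | _ n ih =>
  intro j f hj0 hjc hn hf heq
  have hcj : c ≤ j := pvLastLE_le _ _ _ _ heq (by intro v hv; simp at hv)
  rcases eq_or_lt_of_le hj0 with rfl | hjgt
  · exfalso
    rw [pvLastLE_all_gt _ _ _ (fun x hx => by
      have := (mem_onesRowL.mp hx).1.1; omega)] at heq
    simp at heq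
  · have hj0' : 0 ≤ j := by omega
    have hcell : pvCell M i j = PySem.List.pyGetD (M.getD i.toNat []) j 0 := by
      rw [pvCell, rowAt_eq _ _ hi0]
    have hcmem : c ∈ onesRowL cols (M.getD i.toNat []) := by
      rcases pvLastLE_mem _ _ _ _ heq with h | h
      · exact h
      · exact absurd h (by simp)
    by_cases hv : PySem.List.pyGetD (M.getD i.toNat []) j 0 = 1
    · have hmem : j ∈ onesRowL cols (M.getD i.toNat []) :=
        mem_onesRowL.mpr ⟨⟨hj0', hjc⟩, hv⟩
      rw [pvLastLE_self _ _ (pairwise_onesRowL _ _) hmem] at heq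
      obtain rfl : j = c := Option.some.inj heq
      rw [pvStepLoop, if_pos ⟨hi, hjc, hi0, hj0'⟩,
        if_neg (by rw [hcell]; simpa using hv)]
      simp
    · have hne : c ≠ j := fun he => hv (by rw [← he]; exact (mem_onesRowL.mp hcmem).2)
      have hc0 : 0 ≤ c := (mem_onesRowL.mp hcmem).1.1
      obtain ⟨f', rfl⟩ : ∃ f', f = f' + 1 := ⟨f - 1, by omega⟩
      rw [pvStepLoop, if_pos ⟨hi, hjc, hi0, hj0'⟩, if_pos (by rw [hcell]; exact hv),
        if_neg (by omega), if_neg (by omega), if_pos hmod]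
      have hshift : pvLastLE (onesRowL cols (M.getD i.toNat [])) (j - 1) none = some c := by
        rw [← pvLastLE_shift _ _ (fun x hx hxj => hv (by rw [← hxj]; exact (mem_onesRowL.mp hx).2))]
        exact heq
      have := ih ((j - 1 + 1).toNat) (by omega) (j - 1) f' (by omega) (by omega) rfl
        (by omega) hshift
      rw [this]
      have : f' + 1 - (j - c).toNat = f' - (j - 1 - c).toNat := by omega
      rw [this]

lemma run_up_none (rows cols : Int) (M : List (List Int)) (j count : Int)
    (hj0 : 0 ≤ j) (hj : j < cols) (hmod : PySem.Int.mod count 4 = 3) :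
    ∀ n (i : Int) (f : Nat), -1 ≤ i → i < rows → (i + 1).toNat = n → n ≤ f →
      pvLastLE (onesColL rows M j) i none = none →
      pvStepLoop rows cols (f + 1) M i j count = (i - (i + 1), j, count) := by
  intro n
  induction n using Nat.strong_induction_on with
  | _ n ih =>
  intro i f hi0 hir hn hf heq
  rcases eq_or_lt_of_le hi0 with rfl | higt
  · rw [pvStepLoop, if_neg (by omega)]
    norm_num
  · have hi0' : 0 ≤ i := by omega
    have hv : pvCell M i j ≠ 1 := by
      intro h1
      have hmem : i ∈ onesColL rows M j := mem_onesColL.mpr ⟨⟨hi0', hir⟩, h1⟩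
      rw [pvLastLE_self _ _ (pairwise_onesColL _ _ _) hmem] at heq
      simp at heq
    obtain ⟨f', rfl⟩ : ∃ f', f = f' + 1 := ⟨f - 1, by omega⟩
    rw [pvStepLoop, if_pos ⟨hir, hj, hi0', hj0⟩, if_pos hv,
      if_neg (by omega), if_neg (by omega), if_neg (by omega)]
    have hshift : pvLastLE (onesColL rows M j) (i - 1) none = none := by
      rw [← pvLastLE_shift _ _ (fun r hr hri => hv (by rw [← hri]; exact (mem_onesColL.mp hr).2))]
      exact heq
    have := ih ((i - 1 + 1).toNat) (by omega) (i - 1) f' (by omega) (by omega) rfl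
      (by omega) hshift
    rw [this]
    have : i - 1 - (i - 1 + 1) = i - (i + 1) := by ring
    rw [this]

lemma run_up_some (rows cols : Int) (M : List (List Int)) (j count r : Int)
    (hj0 : 0 ≤ j) (hj : j < cols) (hmod : PySem.Int.mod count 4 = 3) :
    ∀ n (i : Int) (f : Nat), -1 ≤ i → i < rows → (i + 1).toNat = n → n ≤ f →
      pvLastLE (onesColL rows M j) i none = some r →
      pvStepLoop rows cols (f + 1) M i j count =
        pvStepLoop rows cols (f - (i - r).toNat) (pvClearAt M r j) r j (count + 1) := by
  intro n
  induction n using Nat.strong_induction_on with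
  | _ n ih =>
  intro i f hi0 hir hn hf heq
  have hri : r ≤ i := pvLastLE_le _ _ _ _ heq (by intro v hv; simp at hv)
  rcases eq_or_lt_of_le hi0 with rfl | higt
  · exfalso
    rw [pvLastLE_all_gt _ _ _ (fun x hx => by
      have := (mem_onesColL.mp hx).1.1; omega)] at heq
    simp at heq
  · have hi0' : 0 ≤ i := by omega
    have hrmem : r ∈ onesColL rows M j := by
      rcases pvLastLE_mem _ _ _ _ heq with h | h
      · exact h
      · exact absurd h (by simp)
    by_cases hv : pvCell M i j = 1
    · have hmem : i ∈ onesColL rows M j := mem_onesColL.mpr ⟨⟨hi0', hir⟩, hv⟩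
      rw [pvLastLE_self _ _ (pairwise_onesColL _ _ _) hmem] at heq
      obtain rfl : i = r := Option.some.inj heq
      rw [pvStepLoop, if_pos ⟨hir, hj, hi0', hj0⟩, if_neg (by simpa using hv)]
      simp
    · have hne : r ≠ i := fun he => hv (by rw [← he]; exact (mem_onesColL.mp hrmem).2)
      have hr0 : 0 ≤ r := (mem_onesColL.mp hrmem).1.1
      obtain ⟨f', rfl⟩ : ∃ f', f = f' + 1 := ⟨f - 1, by omega⟩
      rw [pvStepLoop, if_pos ⟨hir, hj, hi0', hj0⟩, if_pos hv,
        if_neg (by omega), if_neg (by omega), if_neg (by omega)]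
      have hshift : pvLastLE (onesColL rows M j) (i - 1) none = some r := by
        rw [← pvLastLE_shift _ _ (fun x hx hxi => hv (by rw [← hxi]; exact (mem_onesColL.mp hx).2))]
        exact heq
      have := ih ((i - 1 + 1).toNat) (by omega) (i - 1) f' (by omega) (by omega) rfl
        (by omega) hshift
      rw [this]
      have : f' + 1 - (i - r).toNat = f' - (i - 1 - r).toNat := by omega
      rw [this]

-- the main loop correspondence ----------------------------------------------

lemma clear_shape (cols : Int) (M : List (List Int)) (i c : Int)
    (hi0 : 0 ≤ i) (hil : i.toNat < M.length)
    (hshape : ∀ row ∈ M, cols.toNat ≤ row.length) :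
    ∀ row ∈ pvClearAt M i c, cols.toNat ≤ row.length := by
  intro row hrow
  rcases List.mem_or_eq_of_mem_set hrow with h | h
  · exact hshape _ h
  · subst h
    rw [List.length_set, rowAt_eq _ _ hi0]
    refine hshape _ ?_
    rw [List.getD_eq_getElem?_getD, List.getElem?_eq_getElem hil]
    exact List.getElem_mem _

lemma getD_mem_of_lt (M : List (List Int)) (k : Nat) (hk : k < M.length) :
    M.getD k [] ∈ M := by
  rw [List.getD_eq_getElem?_getD, List.getElem?_eq_getElem hk]
  exact List.getElem_mem _

lemma mod_succ_eq (count : Int) (v : Int) (h : PySem.Int.mod count 4 = v) :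
    PySem.Int.mod (v + 1) 4 = PySem.Int.mod (count + 1) 4 := by
  rw [PySem.Int.mod_eq_emod_of_pos (by norm_num)] at h
  rw [PySem.Int.mod_eq_emod_of_pos (by norm_num), PySem.Int.mod_eq_emod_of_pos (by norm_num)]
  omega

lemma pvOnes_clear_le (M : List (List Int)) (i c : Int) (hi : 0 ≤ i) (hc : 0 ≤ c)
    (h1 : pvCell M i c = 1) : pvOnes (pvClearAt M i c) + 1 ≤ pvOnes M :=
  pvOnes_clear_lt M i c hi hc h1

lemma jump_eq_step (rows cols : Int) :
    ∀ N (M : List (List Int)) (i j count : Int) (fA fB : Nat),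
      pvOnes M = N →
      rows = (M.length : Int) →
      (∀ row ∈ M, cols.toNat ≤ row.length) →
      0 ≤ i → i < rows → 0 ≤ j → j < cols → 0 ≤ count →
      (pvOnes M + 1) * (rows.toNat + cols.toNat + 2) ≤ fA →
      pvSumLen (rowOnesF cols M) + pvSumLen (colOnesF rows cols M) < fB →
      pvJumpLoop rows cols fB (rowOnesF cols M) (colOnesF rows cols M) i j
          (PySem.Int.mod count 4) =
        pvFinish (pvStepLoop rows cols fA M i j count) := by
  intro N
  induction N using Nat.strong_induction_on with
  | _ N ihN =>
  intro M i j count fA fB hN hrows hshape hi0 hi hj0 hj hcnt hfA hfB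
  have hil : i.toNat < M.length := by omega
  have hjl : j.toNat < cols.toNat := by omega
  have hB2 : 2 ≤ rows.toNat + cols.toNat + 2 := by omega
  have hpos : 0 < (pvOnes M + 1) * (rows.toNat + cols.toNat + 2) := by positivity
  have hexp : (pvOnes M + 1) * (rows.toNat + cols.toNat + 2) =
      pvOnes M * (rows.toNat + cols.toNat + 2) + (rows.toNat + cols.toNat + 2) := by ring
  obtain ⟨gA, rfl⟩ : ∃ g, fA = g + 1 := ⟨fA - 1, by omega⟩
  obtain ⟨gB, rfl⟩ : ∃ g, fB = g + 1 := ⟨fB - 1, by omega⟩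
  have hgA : pvOnes M * (rows.toNat + cols.toNat + 2) + rows.toNat + cols.toNat + 1 ≤ gA := by
    omega
  -- the continuation after a hit, shared by the four directions
  have CONT : ∀ (r c : Int) (fA' : Nat), 0 ≤ r → r < rows → 0 ≤ c → c < cols →
      pvCell M r c = 1 →
      (pvOnes (pvClearAt M r c) + 1) * (rows.toNat + cols.toNat + 2) ≤ fA' →
      pvJumpLoop rows cols gB (rowOnesF cols (pvClearAt M r c))
          (colOnesF rows cols (pvClearAt M r c)) r c (PySem.Int.mod (count + 1) 4) =
        pvFinish (pvStepLoop rows cols fA' (pvClearAt M r c) r c (count + 1)) := by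
    intro r c fA' hr0 hr hc0 hc h1 hfA'
    refine ihN (pvOnes (pvClearAt M r c))
      (hN ▸ pvOnes_clear_lt M r c hr0 hc0 h1) _ r c (count + 1) fA' gB rfl
      (by rw [pvClearAt, List.length_set]; exact hrows)
      (clear_shape cols M r c hr0 (by omega) hshape)
      hr0 hr hc0 hc (by omega) hfA' ?_
    -- fuel bound for B: both index lists lost the hit obstacle
    have h1' : PySem.List.pyGetD (M.getD r.toNat []) c 0 = 1 := by
      rw [← rowAt_eq _ _ hr0, ← pvCell]; exact h1
    have hrl : r.toNat < M.length := by omega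
    have hlenr := hshape _ (getD_mem_of_lt M r.toNat hrl)
    have hcmem : c ∈ onesRowL cols (M.getD r.toNat []) :=
      mem_onesRowL.mpr ⟨⟨hc0, hc⟩, h1'⟩
    have himem : r ∈ onesColL rows M c := mem_onesColL.mpr ⟨⟨hr0, hr⟩, h1⟩
    rw [rowOnesF_clear cols M r c hr0 hc0 hc hlenr h1',
      colOnesF_clear rows cols M r c hrows hr0 hr hc0 hc (by omega) h1]
    have hR : pvSumLen ((rowOnesF cols M).set r.toNat
        (pvRemove (onesRowL cols (M.getD r.toNat [])) c)) < pvSumLen (rowOnesF cols M) := by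
      have := pvRemove_length_lt _ _ hcmem
      refine pvSumLen_set_lt _ _ _ (by rw [rowOnesF, List.length_map]; exact hrl) ?_
      rw [rowOnesF_getD cols M r.toNat hrl]
      exact this
    have hC : pvSumLen ((colOnesF rows cols M).set c.toNat
        (pvRemove (onesColL rows M c) r)) ≤ pvSumLen (colOnesF rows cols M) := by
      refine pvSumLen_set_le _ _ _ ?_
      rw [colOnesF_getD rows cols M c hc0 hc]
      exact pvRemove_length_le _ _
    omega
  have hdd : PySem.Int.mod count 4 = 0 ∨ PySem.Int.mod count 4 = 1 ∨
      PySem.Int.mod count 4 = 2 ∨ PySem.Int.mod count 4 = 3 := by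
    have h1 := PySem.Int.mod_nonneg count (by norm_num : (0:Int) < 4)
    have h2 := PySem.Int.mod_lt count (by norm_num : (0:Int) < 4)
    omega
  rcases hdd with hd | hd | hd | hd
  · -- right
    rw [pvJumpLoop, if_pos hd, rowOnesF_getD cols M i.toNat hil]
    split
    · next heq =>
      rw [run_right_none rows cols M i count hi0 hi hd (cols - j).toNat j gA hj0
        (le_of_lt hj) rfl (by omega) heq]
      have he : j + (cols - j) = cols := by ring
      rw [he]
      simp only [pvFinish]
      rw [if_pos hd]
    · next c heq =>
      have hcmem := mem_onesRowL.mp (List.mem_of_find?_eq_some heq)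
      obtain ⟨⟨hc0, hcc⟩, hcell⟩ := hcmem
      have hcj : j ≤ c := by simpa using List.find?_some heq
      have hpv1 : pvCell M i c = 1 := by rw [pvCell, rowAt_eq _ _ hi0]; exact hcell
      rw [colOnesF_getD rows cols M c hc0 hcc,
        ← rowOnesF_clear cols M i c hi0 hc0 hcc (hshape _ (getD_mem_of_lt M i.toNat hil)) hcell,
        ← colOnesF_clear rows cols M i c hrows hi0 hi hc0 hcc
          (by have := hshape _ (getD_mem_of_lt M i.toNat hil); omega) hpv1,
        hd, mod_succ_eq count 0 hd,
        run_right_some rows cols M i count c hi0 hi hd (cols - j).toNat j gA hj0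
          (le_of_lt hj) rfl (by omega) heq]
      refine CONT i c _ hi0 hi hc0 hcc hpv1 ?_
      have := pvOnes_clear_le M i c hi0 hc0 hpv1
      have hd1 : (c - j).toNat ≤ rows.toNat + cols.toNat := by omega
      have hm := Nat.mul_le_mul_right (rows.toNat + cols.toNat + 2) this
      rw [hexp] at hfA
      omega
  · -- down
    rw [pvJumpLoop, if_neg (by omega), if_pos hd, colOnesF_getD rows cols M j hj0 hj]
    split
    · next heq =>
      rw [run_down_none rows cols M j count hj0 hj hd (rows - i).toNat i gA hi0
        (le_of_lt hi) rfl (by omega) heq]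
      have he : i + (rows - i) = rows := by ring
      rw [he]
      simp only [pvFinish]
      rw [if_neg (by omega), if_pos hd]
    · next r heq =>
      have hrmem := mem_onesColL.mp (List.mem_of_find?_eq_some heq)
      obtain ⟨⟨hr0, hrr⟩, hcell⟩ := hrmem
      have hrl : r.toNat < M.length := by omega
      have hcell' : PySem.List.pyGetD (M.getD r.toNat []) j 0 = 1 := by
        rw [← rowAt_eq _ _ hr0, ← pvCell]; exact hcell
      rw [rowOnesF_getD cols M r.toNat hrl,
        ← rowOnesF_clear cols M r j hr0 hj0 hj (hshape _ (getD_mem_of_lt M r.toNat hrl)) hcell',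
        ← colOnesF_clear rows cols M r j hrows hr0 hrr hj0 hj
          (by have := hshape _ (getD_mem_of_lt M r.toNat hrl); omega) hcell,
        hd, mod_succ_eq count 1 hd,
        run_down_some rows cols M j count r hj0 hj hd (rows - i).toNat i gA hi0
          (le_of_lt hi) rfl (by omega) heq]
      refine CONT r j _ hr0 hrr hj0 hj hcell ?_
      have := pvOnes_clear_le M r j hr0 hj0 hcell
      have hd1 : (r - i).toNat ≤ rows.toNat + cols.toNat := by omega
      have hm := Nat.mul_le_mul_right (rows.toNat + cols.toNat + 2) this
      rw [hexp] at hfA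
      omega
  · -- left
    rw [pvJumpLoop, if_neg (by omega), if_neg (by omega), if_pos hd,
      rowOnesF_getD cols M i.toNat hil]
    split
    · next heq =>
      rw [run_left_none rows cols M i count hi0 hi hd (j + 1).toNat j gA (by omega)
        hj rfl (by omega) heq]
      have he : j - (j + 1) = -1 := by ring
      rw [he]
      simp only [pvFinish]
      rw [if_neg (by omega), if_neg (by omega), if_pos hd]
      norm_num
    · next c heq =>
      have hcmem : c ∈ onesRowL cols (M.getD i.toNat []) := by
        rcases pvLastLE_mem _ _ _ _ heq with h | h
        · exact h
        · exact absurd h (by simp)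
      obtain ⟨⟨hc0, hcc⟩, hcell⟩ := mem_onesRowL.mp hcmem
      have hpv1 : pvCell M i c = 1 := by rw [pvCell, rowAt_eq _ _ hi0]; exact hcell
      rw [colOnesF_getD rows cols M c hc0 hcc,
        ← rowOnesF_clear cols M i c hi0 hc0 hcc (hshape _ (getD_mem_of_lt M i.toNat hil)) hcell,
        ← colOnesF_clear rows cols M i c hrows hi0 hi hc0 hcc
          (by have := hshape _ (getD_mem_of_lt M i.toNat hil); omega) hpv1,
        hd, mod_succ_eq count 2 hd,
        run_left_some rows cols M i count c hi0 hi hd (j + 1).toNat j gA (by omega)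
          hj rfl (by omega) heq]
      refine CONT i c _ hi0 hi hc0 hcc hpv1 ?_
      have := pvOnes_clear_le M i c hi0 hc0 hpv1
      have hd1 : (j - c).toNat ≤ rows.toNat + cols.toNat := by omega
      have hm := Nat.mul_le_mul_right (rows.toNat + cols.toNat + 2) this
      rw [hexp] at hfA
      omega
  · -- up
    rw [pvJumpLoop, if_neg (by omega), if_neg (by omega), if_neg (by omega),
      colOnesF_getD rows cols M j hj0 hj]
    split
    · next heq =>
      rw [run_up_none rows cols M j count hj0 hj hd (i + 1).toNat i gA (by omega)
        hi rfl (by omega) heq]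
      have he : i - (i + 1) = -1 := by ring
      rw [he]
      simp only [pvFinish]
      rw [if_neg (by omega), if_neg (by omega), if_neg (by omega)]
      norm_num
    · next r heq =>
      have hrmem : r ∈ onesColL rows M j := by
        rcases pvLastLE_mem _ _ _ _ heq with h | h
        · exact h
        · exact absurd h (by simp)
      obtain ⟨⟨hr0, hrr⟩, hcell⟩ := mem_onesColL.mp hrmem
      have hrl : r.toNat < M.length := by omega
      have hcell' : PySem.List.pyGetD (M.getD r.toNat []) j 0 = 1 := by
        rw [← rowAt_eq _ _ hr0, ← pvCell]; exact hcell
      rw [rowOnesF_getD cols M r.toNat hrl,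
        ← rowOnesF_clear cols M r j hr0 hj0 hj (hshape _ (getD_mem_of_lt M r.toNat hrl)) hcell',
        ← colOnesF_clear rows cols M r j hrows hr0 hrr hj0 hj
          (by have := hshape _ (getD_mem_of_lt M r.toNat hrl); omega) hcell,
        hd, mod_succ_eq count 3 hd,
        run_up_some rows cols M j count r hj0 hj hd (i + 1).toNat i gA (by omega)
          hi rfl (by omega) heq]
      refine CONT r j _ hr0 hrr hj0 hj hcell ?_
      have := pvOnes_clear_le M r j hr0 hj0 hcell
      have hd1 : (i - r).toNat ≤ rows.toNat + cols.toNat := by omega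
      have hm := Nat.mul_le_mul_right (rows.toNat + cols.toNat + 2) this
      rw [hexp] at hfA
      omega

-- ===== VERDICT (by name: the statement is the Claim_ definition above) =====
theorem FindExitPoint_spec : Claim_equal_FindExitPoint := by
  intro n m matrix hdom hpre
  obtain ⟨hne, hshape⟩ := hpre
  have hlen0 : 0 < matrix.length := List.length_pos_iff.mpr hne
  show FindExitPoint n m matrix = FindExitPoint_alt n m matrix
  by_cases hc0 : (matrix.headD []).length = 0
  · show pvFinish (pvStepLoop (matrix.length : Int) ((matrix.headD []).length : Int)
        ((pvOnes matrix + 1) * (matrix.length + (matrix.headD []).length + 2)) matrix 0 0 0) =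
      pvJumpLoop (matrix.length : Int) ((matrix.headD []).length : Int)
        (pvSumLen (rowOnesF ((matrix.headD []).length : Int) matrix) +
          pvSumLen (colOnesF (matrix.length : Int) ((matrix.headD []).length : Int) matrix) + 1)
        (rowOnesF ((matrix.headD []).length : Int) matrix)
        (colOnesF (matrix.length : Int) ((matrix.headD []).length : Int) matrix) 0 0 0
    rw [hc0]
    obtain ⟨g, hg⟩ : ∃ g, (pvOnes matrix + 1) * (matrix.length + 0 + 2) = g + 1 :=
      ⟨(pvOnes matrix + 1) * (matrix.length + 0 + 2) - 1, by
        have : 0 < (pvOnes matrix + 1) * (matrix.length + 0 + 2) := by positivity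
        omega⟩
    rw [hg, pvStepLoop, if_neg (by simp)]
    have hrl : (rowOnesF ((0:Nat) : Int) matrix).getD (0:Int).toNat [] = [] := by
      have ht : (0:Int).toNat = 0 := rfl
      rw [ht, rowOnesF_getD _ _ 0 hlen0, onesRowL, PySem.List.pyRange_one_eq_nil (by simp)]
      rfl
    rw [pvJumpLoop, if_pos rfl, hrl]
    simp [pvFindGE, pvFinish]
  · have hcols : (0:Int) < ((matrix.headD []).length : Int) := by
      exact_mod_cast Nat.pos_of_ne_zero hc0
    have h := jump_eq_step (matrix.length : Int) ((matrix.headD []).length : Int)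
      (pvOnes matrix) matrix 0 0 0
      ((pvOnes matrix + 1) * (matrix.length + (matrix.headD []).length + 2))
      (pvSumLen (rowOnesF ((matrix.headD []).length : Int) matrix) +
        pvSumLen (colOnesF (matrix.length : Int) ((matrix.headD []).length : Int) matrix) + 1)
      rfl rfl
      (by intro row hr; simpa using hshape row hr)
      le_rfl (by exact_mod_cast hlen0) le_rfl hcols le_rfl
      (by simp) (by omega)
    rw [show PySem.Int.mod 0 4 = 0 by decide] at h
    exact h.symm
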